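-- pv_equiv track=rewrite | github.com/n7tms/EverybodyCodes | 2025.6/q1.py | eni_algo2
-- ===== SOURCE A (Python) =====
-- def eni_algo2(n, e, m):
--
--     memoized_rem = list()
--     score = 1
--     remainders = list()
--     for _ in range(e):
--         score *= n
--         rem = score % m
--         remainders.insert(0,rem)
--
--         if remainders[:5] in memoized_rem:
--             T = e
--             n = _
--             s = memoized_rem.index(remainders[:5])
--             c = n - s
--             correct = memoized_rem[s + (T - 1 - s) % c]
--             break
--         else:
--             memoized_rem.append(remainders[:5].copy())
--
--     if _+1 == e:
--         correct = remainders[:5].copy()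
--
--
--     return "".join([str(r) for r in correct])
-- ===== SOURCE B (Python) =====
-- def eni_algo2(n, e, m):
--     return "".join(str(pow(n, i, m)) for i in range(e, max(0, e - 5), -1))
-- ===== Notes on version B (the rewrite author's own statement) =====
-- stated objective: faster
-- what changed: Replaced the O(e)/cycle-detection loop that multiplies step by step, keeps all remainders and searches a memo list of 5-windows with a direct closed form: the answer is just str(pow(n,i,m)) for i = e down to max(1,e-4), each computed by built-in modular exponentiation.
import Mathlib
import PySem

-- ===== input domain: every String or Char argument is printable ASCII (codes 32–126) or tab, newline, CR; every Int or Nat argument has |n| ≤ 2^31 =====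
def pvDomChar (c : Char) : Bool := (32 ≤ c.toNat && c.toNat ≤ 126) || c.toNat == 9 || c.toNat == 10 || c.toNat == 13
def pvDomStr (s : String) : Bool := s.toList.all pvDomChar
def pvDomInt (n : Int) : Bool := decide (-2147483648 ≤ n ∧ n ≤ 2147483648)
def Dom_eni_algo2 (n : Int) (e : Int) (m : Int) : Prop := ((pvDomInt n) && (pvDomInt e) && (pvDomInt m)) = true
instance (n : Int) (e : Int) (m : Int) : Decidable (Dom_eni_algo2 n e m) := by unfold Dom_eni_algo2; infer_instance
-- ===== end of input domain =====

-- B replaces A's step-by-step multiplication loop with memoized 5-window cycle detection by a direct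
-- closed form: str(pow(n,i,m)) for i = e down to max(1,e-4) (built-in modular exponentiation); faster.

-- ===== PORT A =====
-- The for-loop of A: fuel = remaining iterations, score/rems/memo = the Python locals;
-- returns (correct-if-break, remainders, final value of the loop variable `_`).
def eni_algo2_loop (n : Int) (m : Int) (e : Nat) :
    Nat → Int → List Int → List (List Int) → Option (List Int) × List Int × Int
  | 0, _, rems, _ => (none, rems, (e : Int) - 1)
  | fuel+1, score, rems, memo =>
      let score' := score * n
      let rem := PySem.Int.mod score' m
      let rems' := rem :: rems
      let w := rems'.take 5
      if w ∈ memo then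
        let T : Int := (e : Int)
        let nn : Int := (e : Int) - ((fuel : Int) + 1)   -- `n = _` in A (the loop variable)
        let s : Int := ((PySem.List.index? memo w).getD 0 : Nat)
        let c : Int := nn - s
        let correct := (PySem.List.pyGet? memo (s + PySem.Int.mod (T - 1 - s) c)).getD []
        (some correct, rems', nn)
      else
        eni_algo2_loop n m e fuel score' rems' (memo ++ [w])

def eni_algo2 (n : Int) (e : Int) (m : Int) : String :=
  if e ≤ 0 then ""   -- range(e) is empty: Python A raises NameError (`_` unbound); excluded by Pre_
  else
    let r := eni_algo2_loop n m e.toNat e.toNat 1 [] []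
    let correct := if r.2.2 + 1 = e then r.2.1.take 5 else r.1.getD []
    PySem.Str.join "" (correct.map (fun x => PySem.Int.toStr x))

-- ===== PORT B =====
def eni_algo2_alt (n : Int) (e : Int) (m : Int) : String :=
  PySem.Str.join ""
    ((PySem.List.pyRange e (max 0 (e - 5)) (-1)).map
      (fun i => PySem.Int.toStr (PySem.Int.powMod n i.toNat m)))

-- ===== PRECONDITION & SPEC =====
-- Pre_ excludes e ≤ 0 (A's loop never runs and `_` is unbound: NameError) and m = 0 (ZeroDivisionError).
def Pre_eni_algo2 (n : Int) (e : Int) (m : Int) : Prop := 1 ≤ e ∧ m ≠ 0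
instance (n : Int) (e : Int) (m : Int) : Decidable (Pre_eni_algo2 n e m) := by
  unfold Pre_eni_algo2; infer_instance
def pvWitness_eni_algo2 : Int × Int × Int := (2, 3, 5)

def Spec_eni_algo2 (n : Int) (e : Int) (m : Int) (out : String) : Prop := out = eni_algo2_alt n e m
instance (n : Int) (e : Int) (m : Int) (out : String) : Decidable (Spec_eni_algo2 n e m out) := by
  unfold Spec_eni_algo2; infer_instance

-- ===== CLAIM (what is proved, stated in full; the proofs are below) =====
def Claim_equal_eni_algo2 : Prop := ∀ (n : Int) (e : Int) (m : Int), Dom_eni_algo2 n e m → Pre_eni_algo2 n e m → Spec_eni_algo2 n e m (eni_algo2 n e m)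
-- ===== LEMMAS AND PROOFS =====

-- r j = n^j % m, the j-th remainder; pvRems k = A's `remainders` after k iterations;
-- pvW k = remainders[:5] after k iterations; pvMemo k = A's `memoized_rem` after k appends.
def pvR (n m : Int) (j : Nat) : Int := PySem.Int.mod (n ^ j) m
def pvRems (n m : Int) : Nat → List Int
  | 0 => []
  | k+1 => pvR n m (k+1) :: pvRems n m k
def pvW (n m : Int) (k : Nat) : List Int := (pvRems n m k).take 5
def pvMemo (n m : Int) (k : Nat) : List (List Int) := (List.range k).map (fun t => pvW n m (t+1))

theorem pvRems_length (n m : Int) (k : Nat) : (pvRems n m k).length = k := by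
  induction k with
  | zero => rfl
  | succ k ih => simp [pvRems, ih]

theorem pvW_length (n m : Int) (k : Nat) : (pvW n m k).length = min 5 k := by
  simp [pvW, pvRems_length]

theorem pvW_five (n m : Int) (a : Nat) :
    pvW n m (a+5) = [pvR n m (a+5), pvR n m (a+4), pvR n m (a+3), pvR n m (a+2), pvR n m (a+1)] := by
  simp [pvW, pvRems]

theorem pv_mod_mul (a b m : Int) :
    PySem.Int.mod (PySem.Int.mod a m * b) m = PySem.Int.mod (a * b) m := by
  have h := PySem.Int.floordiv_mul_add_mod a m
  have h2 : PySem.Int.mod a m = a - PySem.Int.floordiv a m * m := by omega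
  rw [h2, sub_mul]
  have h3 : a * b - PySem.Int.floordiv a m * m * b
      = a * b + (-(PySem.Int.floordiv a m * b)) * m := by ring
  rw [h3]
  simp [PySem.Int.mod]

theorem pvR_succ (n m : Int) (j : Nat) :
    pvR n m (j+1) = PySem.Int.mod (pvR n m j * n) m := by
  rw [pvR, pvR, pow_succ, pv_mod_mul]

-- periodicity of r from the five base equalities
theorem pvR_period (n m : Int) (a c : Nat)
    (h1 : pvR n m (a+1+c) = pvR n m (a+1)) (h2 : pvR n m (a+2+c) = pvR n m (a+2))
    (h3 : pvR n m (a+3+c) = pvR n m (a+3)) (h4 : pvR n m (a+4+c) = pvR n m (a+4))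
    (h5 : pvR n m (a+5+c) = pvR n m (a+5)) :
    ∀ j, a+1 ≤ j → pvR n m (j+c) = pvR n m j := by
  have key : ∀ d, pvR n m (a+5+d+c) = pvR n m (a+5+d) := by
    intro d
    induction d with
    | zero => simpa using h5
    | succ d ih =>
        have e1 : a+5+(d+1)+c = (a+5+d+c)+1 := by omega
        have e2 : a+5+(d+1) = (a+5+d)+1 := by omega
        rw [e1, e2, pvR_succ, pvR_succ, ih]
  intro j hj
  have hc : j = a+1 ∨ j = a+2 ∨ j = a+3 ∨ j = a+4 ∨ ∃ d, j = a+5+d := by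
    rcases Nat.lt_or_ge j (a+5) with h | h
    · omega
    · exact Or.inr (Or.inr (Or.inr (Or.inr ⟨j-(a+5), by omega⟩)))
  rcases hc with rfl | rfl | rfl | rfl | ⟨d, rfl⟩
  · exact h1
  · exact h2
  · exact h3
  · exact h4
  · exact key d

theorem pvW_period (n m : Int) (a c : Nat)
    (hr : ∀ j, a+1 ≤ j → pvR n m (j+c) = pvR n m j) :
    ∀ j, a+5 ≤ j → pvW n m (j+c) = pvW n m j := by
  intro j hj
  obtain ⟨t, rfl, ht⟩ : ∃ t, j = t+5 ∧ a ≤ t := ⟨j-5, by omega, by omega⟩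
  have h1 : t+5+c = (t+c)+5 := by omega
  rw [h1, pvW_five, pvW_five]
  have e5 : t+c+5 = (t+5)+c := by omega
  have e4 : t+c+4 = (t+4)+c := by omega
  have e3 : t+c+3 = (t+3)+c := by omega
  have e2 : t+c+2 = (t+2)+c := by omega
  have e1 : t+c+1 = (t+1)+c := by omega
  rw [e5, e4, e3, e2, e1, hr (t+5) (by omega), hr (t+4) (by omega),
      hr (t+3) (by omega), hr (t+2) (by omega), hr (t+1) (by omega)]

theorem pvW_period_iter (n m : Int) (a c : Nat)
    (hw : ∀ j, a+5 ≤ j → pvW n m (j+c) = pvW n m j) :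
    ∀ q j, a+5 ≤ j → pvW n m (j + q*c) = pvW n m j := by
  intro q
  induction q with
  | zero => intro j hj; simp
  | succ q ih =>
      intro j hj
      have : j + (q+1)*c = (j + q*c) + c := by ring
      rw [this, hw _ (by omega), ih _ hj]

theorem pvMemo_getElem (n m : Int) (k t : Nat) (ht : t < k) :
    (pvMemo n m k)[t]'(by simp [pvMemo]; omega) = pvW n m (t+1) := by
  simp [pvMemo]

-- the main loop invariant: starting from the state after k clean iterations, A ends up with
-- correct = remainders[:5] as of iteration e, i.e. pvW n m e.
theorem pv_loop_correct (n m : Int) (e : Nat) (he : 0 < e) :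
    ∀ fuel k, fuel + k = e →
    (let r := eni_algo2_loop n m e fuel (n ^ k) (pvRems n m k) (pvMemo n m k)
     (if r.2.2 + 1 = (e : Int) then r.2.1.take 5 else r.1.getD []) = pvW n m e) := by
  intro fuel
  induction fuel with
  | zero =>
      intro k hk
      obtain rfl : k = e := by omega
      simp [eni_algo2_loop, pvW]
  | succ fuel ih =>
      intro k hk
      simp only [eni_algo2_loop]
      have hsc : n ^ k * n = n ^ (k+1) := (pow_succ n k).symm
      have hrem : PySem.Int.mod (n ^ k * n) m = pvR n m (k+1) := by
        rw [hsc]; rfl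
      by_cases hmem : (PySem.Int.mod (n ^ k * n) m :: pvRems n m k).take 5 ∈ pvMemo n m k
      · -- break branch
        rw [if_pos hmem]
        have hwin : (PySem.Int.mod (n ^ k * n) m :: pvRems n m k).take 5 = pvW n m (k+1) := by
          rw [hrem]; rfl
        by_cases hf : fuel = 0
        · subst hf
          have hke : k + 1 = e := by omega
          simp only []
          rw [if_pos (by omega), hwin]
          exact congrArg (pvW n m) hke
        · -- fuel ≥ 1, so k+1 < e: use the cycle formula
          simp only []
          rw [if_neg (by omega)]
          -- extract the index
          rw [hwin] at hmem ⊢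
          obtain ⟨s0, hidx⟩ : ∃ s0, PySem.List.index? (pvMemo n m k) (pvW n m (k+1)) = some s0 := by
            have := (PySem.List.index?_isSome_iff (pvMemo n m k) (pvW n m (k+1))).mpr hmem
            exact Option.isSome_iff_exists.mp this
          obtain ⟨hs0lt, hs0get, -⟩ := PySem.List.getElem_of_index?_eq_some hidx
          have hmlen : (pvMemo n m k).length = k := by simp [pvMemo]
          rw [hmlen] at hs0lt
          have hEq : pvW n m (s0+1) = pvW n m (k+1) := by
            rw [← pvMemo_getElem n m k s0 hs0lt]
            exact hs0get
          -- s0 ≥ 4 from the window lengths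
          have hlen := congrArg List.length hEq
          rw [pvW_length, pvW_length] at hlen
          have hs4 : 4 ≤ s0 := by omega
          obtain ⟨a, rfl⟩ : ∃ a, s0 = a + 4 := ⟨s0 - 4, by omega⟩
          obtain ⟨c, hkc⟩ : ∃ c, k = a + 4 + c ∧ 1 ≤ c := ⟨k - (a+4), by omega⟩
          obtain ⟨hkc, hc1⟩ := hkc
          subst hkc
          -- the five base equalities
          have hEq5 : pvW n m (a+5) = pvW n m (a+5+c) := by
            rw [hEq]; congr 1; omega
          rw [pvW_five, show a+5+c = (a+c)+5 by omega, pvW_five] at hEq5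
          simp only [List.cons.injEq, and_true] at hEq5
          obtain ⟨q5, q4, q3, q2, q1⟩ := hEq5
          have hr := pvR_period n m a c
            (by rw [show a+1+c = a+c+1 by omega]; exact q1.symm)
            (by rw [show a+2+c = a+c+2 by omega]; exact q2.symm)
            (by rw [show a+3+c = a+c+3 by omega]; exact q3.symm)
            (by rw [show a+4+c = a+c+4 by omega]; exact q4.symm)
            (by rw [show a+5+c = a+c+5 by omega]; exact q5.symm)
          have hwper := pvW_period n m a c hr
          have hiter := pvW_period_iter n m a c hwper
          -- compute the index expression and look it up in the memo
          rw [hidx]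
          simp only [Option.getD_some]
          set D : Nat := e - 1 - (a+4) with hD
          have hfuel1 : 1 ≤ fuel := by omega
          have hcast1 : (e:Int) - 1 - ((a+4 : Nat) : Int) = ((D : Nat) : Int) := by
            push_cast; omega
          have hcast2 : (e:Int) - ((fuel : Int) + 1) - ((a+4 : Nat) : Int) = ((c : Nat) : Int) := by
            push_cast; omega
          rw [hcast1, hcast2, PySem.Int.mod_natCast,
              show ((a+4 : Nat) : Int) + ((D % c : Nat) : Int) = ((a+4+D%c : Nat) : Int) by push_cast; ring,
              PySem.List.pyGet?_natCast]
          have hmod : D % c < c := Nat.mod_lt _ (by omega)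
          have hlt : a+4+D%c < (pvMemo n m (a+4+c)).length := by
            simp [pvMemo]; omega
          rw [List.getElem?_eq_getElem hlt]
          simp only [Option.getD_some]
          rw [pvMemo_getElem n m (a+4+c) (a+4+D%c) (by omega)]
          rw [show a+4+D%c+1 = a+5+D%c from by omega]
          have hdm := Nat.div_add_mod D c
          have hcomm : (D/c)*c = c*(D/c) := Nat.mul_comm _ _
          rw [show e = (a+5+D%c) + (D/c)*c from by omega]
          exact (hiter (D/c) (a+5+D%c) (by omega)).symm
      · rw [if_neg hmem]
        have hrems : (PySem.Int.mod (n ^ k * n) m :: pvRems n m k) = pvRems n m (k+1) := by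
          rw [hrem]; rfl
        have hmemo : pvMemo n m k ++ [(pvRems n m (k+1)).take 5]
            = pvMemo n m (k+1) := by
          show _ = (List.range (k+1)).map (fun t => pvW n m (t+1))
          rw [List.range_succ, List.map_append]
          rfl
        rw [hrems, hmemo, hsc]
        exact ih (k+1) (by omega)

theorem pv_alt_window (n m : Int) (E : Nat) (hE : 1 ≤ E) :
    (PySem.List.pyRange (E : Int) (max 0 ((E : Int) - 5)) (-1)).map
      (fun i => PySem.Int.powMod n i.toNat m) = pvW n m E := by
  rcases Nat.lt_or_ge E 5 with h | h
  · interval_cases E <;>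
      simp [PySem.List.pyRange_neg_one, pvW, pvRems, pvR, PySem.Int.powMod_eq,
            List.range_succ]
  · obtain ⟨a, rfl⟩ : ∃ a, E = a+5 := ⟨E-5, by omega⟩
    rw [PySem.List.pyRange_neg_one]
    have h5 : (((a+5 : Nat) : Int) - max 0 (((a+5 : Nat) : Int) - 5)).toNat = 5 := by omega
    rw [h5]
    simp only [show List.range 5 = [0,1,2,3,4] from rfl, List.map_cons, List.map_nil,
      pvW_five, PySem.Int.powMod_eq, pvR]
    push_cast
    rw [show ((a:Int)+5-0).toNat = a+5 by omega, show ((a:Int)+5-1).toNat = a+4 by omega,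
        show ((a:Int)+5-2).toNat = a+3 by omega, show ((a:Int)+5-3).toNat = a+2 by omega,
        show ((a:Int)+5-4).toNat = a+1 by omega]

-- ===== VERDICT (by name: the statement is the Claim_ definition above) =====
theorem eni_algo2_spec : Claim_equal_eni_algo2 := by
  intro n e m _ hpre
  obtain ⟨he, hm⟩ := hpre
  unfold Spec_eni_algo2 eni_algo2 eni_algo2_alt
  have hnot : ¬ e ≤ 0 := by omega
  simp only [hnot, if_false]
  have hrange : ((e.toNat : Nat) : Int) = e := by omega
  have hloop := pv_loop_correct n m e.toNat (by omega) e.toNat 0 (by omega)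
  simp only [pvRems, pvMemo, List.range_zero, List.map_nil, pow_zero, hrange] at hloop
  have hw := congrArg (List.map (fun x => PySem.Int.toStr x)) (pv_alt_window n m e.toNat (by omega))
  rw [List.map_map] at hw
  simp only [Function.comp_def, hrange] at hw
  rw [hloop, ← hw]
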